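-- pv_equiv track=rewrite | github.com/Zaczero/osm-relatify | web/overpass.py | split_by_count
-- ===== SOURCE A (Python) =====
-- from typing import Iterable, NamedTuple, Sequence
--
-- def split_by_count(elements: Iterable[dict]) -> list[list[dict]]:
--     result = []
--     current_split = []
--
--     for e in elements:
--         if e['type'] == 'count':
--             result.append(current_split)
--             current_split = []
--         else:
--             current_split.append(e)
--
--     assert not current_split, 'Last element must be count type'
--     return result
-- ===== SOURCE B (Python) =====
-- def split_by_count(elements):
--     # Two-phase decomposition: materialize, find count-boundary indices, then slice.
--     L = list(elements)
--     idxs = [i for i, e in enumerate(L) if e['type'] == 'count']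
--     result = []
--     prev = 0
--     for i in idxs:
--         result.append(L[prev:i])
--         prev = i + 1
--     assert prev == len(L), 'Last element must be count type'
--     return result
-- ===== Notes on version B (the rewrite author's own statement) =====
-- stated objective: alternative
-- what changed: Replaces A's single accumulate-and-flush pass (mutable current_split buffer) with a two-phase find-boundary-indices-then-slice decomposition over the materialized list.
import Mathlib
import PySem

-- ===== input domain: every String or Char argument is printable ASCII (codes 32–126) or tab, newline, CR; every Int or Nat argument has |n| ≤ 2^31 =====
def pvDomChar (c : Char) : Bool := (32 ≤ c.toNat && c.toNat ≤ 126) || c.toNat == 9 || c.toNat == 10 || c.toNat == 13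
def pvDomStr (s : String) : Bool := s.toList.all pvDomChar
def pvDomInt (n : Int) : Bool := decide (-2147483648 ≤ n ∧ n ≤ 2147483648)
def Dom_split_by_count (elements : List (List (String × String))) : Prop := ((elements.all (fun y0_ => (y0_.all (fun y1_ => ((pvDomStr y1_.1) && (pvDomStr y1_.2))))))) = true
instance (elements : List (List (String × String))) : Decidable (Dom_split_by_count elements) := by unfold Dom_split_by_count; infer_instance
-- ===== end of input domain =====

-- B replaces A's accumulate-and-flush pass with a find-boundary-indices-then-slice decomposition (alternative, same cost).


-- shared transliteration of the Python expression  e['type'] == 'count'  (dict built from the pair list)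
def pvIsCount (e : List (String × String)) : Bool :=
  ((PySem.Dict.ofList e).get? "type").getD "" == "count"

-- ===== PORT A =====
def split_by_count (elements : List (List (String × String))) : List (List (List (String × String))) :=
  -- result, current_split accumulated in one pass; the assert only raises, so the value is st.1
  let st := elements.foldl
    (fun (st : List (List (List (String × String))) × List (List (String × String))) e =>
      if pvIsCount e then (st.1 ++ [st.2], []) else (st.1, st.2 ++ [e]))
    ([], [])
  st.1

-- ===== PORT B =====
def split_by_count_alt (elements : List (List (String × String))) : List (List (List (String × String))) :=
  let idxs := (PySem.List.enumerate elements 0).filterMap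
    (fun p => if pvIsCount p.2 then some p.1 else none)
  let st := idxs.foldl
    (fun (st : List (List (List (String × String))) × Int) i =>
      (st.1 ++ [PySem.List.slice elements (some st.2) (some i)], i + 1))
    ([], 0)
  st.1

-- ===== PRECONDITION & SPEC =====
-- Pre_ excludes exactly the inputs where the Python raises: a KeyError when some element
-- lacks the 'type' key, and the AssertionError when the last element is not of type 'count'
-- (i.e. non-count elements trail the final count marker).
def Pre_split_by_count (elements : List (List (String × String))) : Prop :=
  ((elements.all (fun e => (PySem.Dict.ofList e).contains "type")) &&
   ((elements.getLast?.map pvIsCount).getD true)) = true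
instance (elements : List (List (String × String))) : Decidable (Pre_split_by_count elements) := by
  unfold Pre_split_by_count; infer_instance
def pvWitness_split_by_count : (List (List (String × String))) :=
  [[("type", "node")], [("type", "count")]]
def Spec_split_by_count (elements : List (List (String × String))) (out : List (List (List (String × String)))) : Prop := out = split_by_count_alt elements
instance (elements : List (List (String × String))) (out : List (List (List (String × String)))) : Decidable (Spec_split_by_count elements out) := by unfold Spec_split_by_count; infer_instance

-- ===== CLAIM (what is proved, stated in full; the proofs are below) =====
def Claim_equal_split_by_count : Prop := ∀ (elements : List (List (String × String))), Dom_split_by_count elements → Pre_split_by_count elements → Spec_split_by_count elements (split_by_count elements)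

-- ===== LEMMAS AND PROOFS =====

-- the list of absolute indices of count elements in xs, counted from n
def pvIdxFrom (n : Int) : List (List (String × String)) → List Int
  | [] => []
  | e :: xs => if pvIsCount e then n :: pvIdxFrom (n + 1) xs else pvIdxFrom (n + 1) xs

theorem pv_filterMap_enumerate (xs : List (List (String × String))) (s : Int) :
    (PySem.List.enumerate xs s).filterMap (fun p => if pvIsCount p.2 then some p.1 else none)
      = pvIdxFrom s xs := by
  induction xs generalizing s with
  | nil => simp [PySem.List.enumerate_nil, pvIdxFrom]
  | cons e xs ih =>
      rw [PySem.List.enumerate_cons]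
      simp only [List.filterMap_cons, pvIdxFrom]
      by_cases h : pvIsCount e <;> simp [h, ih]

theorem pv_main (xs : List (List (String × String))) :
    ∀ (pre : List (List (String × String)))
      (res : List (List (List (String × String)))) (p : Nat), p ≤ pre.length →
    ((pvIdxFrom (pre.length : Int) xs).foldl
      (fun (st : List (List (List (String × String))) × Int) i =>
        (st.1 ++ [PySem.List.slice (pre ++ xs) (some st.2) (some i)], i + 1))
      (res, (p : Int))).1
    = (xs.foldl
        (fun (st : List (List (List (String × String))) × List (List (String × String))) e =>
          if pvIsCount e then (st.1 ++ [st.2], []) else (st.1, st.2 ++ [e]))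
        (res, pre.drop p)).1 := by
  induction xs with
  | nil => intro pre res p hp; simp [pvIdxFrom]
  | cons e xs ih =>
      intro pre res p hp
      by_cases h : pvIsCount e
      · simp only [pvIdxFrom, h, if_pos, List.foldl_cons]
        have hslice : PySem.List.slice (pre ++ e :: xs) (some (p : Int)) (some (pre.length : Int))
            = pre.drop p := by
          rw [PySem.List.slice_natCast]
          rw [List.drop_append_of_le_length hp]
          rw [List.take_append_of_le_length (by simp [List.length_drop])]
          rw [List.take_of_length_le (by simp [List.length_drop])]
        rw [hslice]
        have h1 : ((pre.length : Int) + 1) = (((pre ++ [e]).length : Nat) : Int) := by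
          simp
        have h2 : pre ++ e :: xs = (pre ++ [e]) ++ xs := by simp
        rw [h1, h2]
        have := ih (pre ++ [e]) (res ++ [pre.drop p]) (pre ++ [e]).length (le_refl _)
        rw [List.drop_of_length_le (le_refl _)] at this
        exact this
      · simp only [pvIdxFrom, h, List.foldl_cons]
        have h2 : pre ++ e :: xs = (pre ++ [e]) ++ xs := by simp
        have h3 : pre.drop p ++ [e] = (pre ++ [e]).drop p := by
          rw [List.drop_append_of_le_length hp]
        have h1 : (pre.length : Int) + 1 = (((pre ++ [e]).length : Nat) : Int) := by
          simp
        rw [h2, h1, h3]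
        exact ih (pre ++ [e]) res p (by simp; omega)

theorem pv_equal (elements : List (List (String × String))) :
    split_by_count elements = split_by_count_alt elements := by
  unfold split_by_count split_by_count_alt
  rw [pv_filterMap_enumerate]
  have h0 : (0 : Int) = ((([] : List (List (String × String))).length : Nat) : Int) := by simp
  have := pv_main elements [] [] 0 (by simp)
  simpa using this.symm

-- ===== VERDICT (by name: the statement is the Claim_ definition above) =====
theorem split_by_count_spec : Claim_equal_split_by_count := by
  intro elements _ _
  unfold Spec_split_by_count
  exact pv_equal elements
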